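-- pv_equiv track=rewrite | github.com/AlertBear/ovirt-manager-auto | art/tests/rhevmtests/integration/snmp_traps/__init__.py | generate_helper
-- ===== SOURCE A (Python) =====
-- def generate_helper(configurations, _helper=None):
--     """
--     Description:
--         Generates helper dictionary to store configuration files paths.
--     Args:
--         configurations (list[str]): list of configurations
--         _helper (dict[str]): helper dictionary
--     """
--     if _helper is None:
--         _helper = dict()
--     c = configurations[0]
--
--     if c == "snmptrapd":
--         _helper[c] = "/etc/snmp/snmptrapd.conf"
--     elif c == "snmptrapd_users":
--         _helper[c] = "/var/lib/net-snmp/snmptrapd.conf"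
--     elif c == "ovirt_notifier":
--         _helper[c] = (
--             "/etc/ovirt-engine/notifier/notifier.conf.d/99-snmp.conf"
--         )
--     elif c == "snmpd":
--         _helper[c] = "/etc/snmp/snmpd.conf"
--     else:
--         raise NotImplementedError(
--             "There's no implementation for this configuration."
--         )
--
--     if len(configurations) > 1:
--         return generate_helper(configurations[1:], _helper)
--     else:
--         return _helper
-- ===== SOURCE B (Python) =====
-- _PATHS = {
--     "snmptrapd": "/etc/snmp/snmptrapd.conf",
--     "snmptrapd_users": "/var/lib/net-snmp/snmptrapd.conf",
--     "ovirt_notifier": "/etc/ovirt-engine/notifier/notifier.conf.d/99-snmp.conf",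
--     "snmpd": "/etc/snmp/snmpd.conf",
-- }
--
--
-- def generate_helper(configurations, _helper=None):
--     if _helper is None:
--         _helper = dict()
--     for c in configurations:
--         try:
--             _helper[c] = _PATHS[c]
--         except KeyError:
--             raise NotImplementedError(
--                 "There's no implementation for this configuration."
--             )
--     return _helper
-- ===== Notes on version B (the rewrite author's own statement) =====
-- stated objective: simpler
-- what changed: Replaced the recursive slice-and-dispatch (if/elif chain plus recursion on configurations[1:]) with a literal name-to-path table and a single flat loop over configurations.
-- crash fix: On an empty configurations list A raises IndexError at configurations[0]; B's loop simply runs zero times and returns the (possibly empty) _helper dict. — e.g. on generate_helper([], none): A raises IndexError, B returns []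
import Mathlib
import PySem

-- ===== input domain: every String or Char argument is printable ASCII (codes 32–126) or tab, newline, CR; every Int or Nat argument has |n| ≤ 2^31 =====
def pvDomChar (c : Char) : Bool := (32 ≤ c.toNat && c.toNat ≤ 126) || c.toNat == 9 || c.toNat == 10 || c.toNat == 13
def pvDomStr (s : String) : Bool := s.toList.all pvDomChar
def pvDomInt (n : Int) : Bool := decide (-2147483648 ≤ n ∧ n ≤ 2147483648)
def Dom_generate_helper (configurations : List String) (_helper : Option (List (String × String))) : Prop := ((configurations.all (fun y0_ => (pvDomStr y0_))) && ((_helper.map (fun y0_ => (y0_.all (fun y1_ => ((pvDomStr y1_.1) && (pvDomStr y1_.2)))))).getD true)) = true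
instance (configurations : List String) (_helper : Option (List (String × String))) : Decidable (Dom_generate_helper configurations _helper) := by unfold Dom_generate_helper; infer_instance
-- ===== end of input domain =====

-- B replaces A's recursive if/elif dispatch (which slices the list at every step) by a literal
-- name→path table and one flat fold; equivalence is about the RETURN value only (Python A and B
-- both mutate a caller-supplied _helper dict in place).

-- ===== PORT A =====
-- literal transliteration of A: look at configurations[0], if/elif chain of inserts,
-- recurse on configurations[1:] while more than one element remains.
def generate_helper (configurations : List String) (_helper : Option (List (String × String))) : List (String × String) :=
  let h : PySem.Dict String String := PySem.Dict.mk (_helper.getD [])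
  match configurations with
  | [] => []  -- configurations[0] raises IndexError in Python (excluded by Pre_)
  | c :: rest =>
    if c = "snmptrapd" then
      let h := h.insert c "/etc/snmp/snmptrapd.conf"
      if rest.length > 0 then generate_helper rest (some h.items) else h.items
    else if c = "snmptrapd_users" then
      let h := h.insert c "/var/lib/net-snmp/snmptrapd.conf"
      if rest.length > 0 then generate_helper rest (some h.items) else h.items
    else if c = "ovirt_notifier" then
      let h := h.insert c "/etc/ovirt-engine/notifier/notifier.conf.d/99-snmp.conf"
      if rest.length > 0 then generate_helper rest (some h.items) else h.items
    else if c = "snmpd" then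
      let h := h.insert c "/etc/snmp/snmpd.conf"
      if rest.length > 0 then generate_helper rest (some h.items) else h.items
    else
      []  -- raise NotImplementedError in Python (excluded by Pre_)

-- ===== PORT B =====
def pvPaths : PySem.Dict String String := PySem.Dict.mk
  [ ("snmptrapd", "/etc/snmp/snmptrapd.conf")
  , ("snmptrapd_users", "/var/lib/net-snmp/snmptrapd.conf")
  , ("ovirt_notifier", "/etc/ovirt-engine/notifier/notifier.conf.d/99-snmp.conf")
  , ("snmpd", "/etc/snmp/snmpd.conf") ]

def generate_helper_alt (configurations : List String) (_helper : Option (List (String × String))) : List (String × String) :=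
  let h : PySem.Dict String String := PySem.Dict.mk (_helper.getD [])
  (configurations.foldl (fun d c =>
      match pvPaths.get? c with
      | some p => d.insert c p
      | none => d  -- Python B raises NotImplementedError here (excluded by Pre_)
    ) h).items

-- ===== PRECONDITION & SPEC =====
-- Pre_ excludes exactly the inputs where Python A raises: the empty list (IndexError at
-- configurations[0]) and any configuration name outside the four known ones (NotImplementedError).
def Pre_generate_helper (configurations : List String) (_helper : Option (List (String × String))) : Prop :=
  configurations ≠ [] ∧
  ∀ c ∈ configurations, c ∈ ["snmptrapd", "snmptrapd_users", "ovirt_notifier", "snmpd"]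
instance (configurations : List String) (_helper : Option (List (String × String))) : Decidable (Pre_generate_helper configurations _helper) := by unfold Pre_generate_helper; infer_instance

def pvWitness_generate_helper : List String × (Option (List (String × String))) :=
  (["snmpd", "snmptrapd"], some [("x", "y")])

-- On an empty configurations list A raises IndexError at configurations[0]; B's loop runs zero
-- times and returns the (possibly empty) _helper dict.
def Raises_generate_helper (configurations : List String) (_helper : Option (List (String × String))) : Prop :=
  configurations = []
instance (configurations : List String) (_helper : Option (List (String × String))) : Decidable (Raises_generate_helper configurations _helper) := by unfold Raises_generate_helper; infer_instance
def pvRaiseWitness_generate_helper : List String × (Option (List (String × String))) := ([], none)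
def pvRaiseWitnessOut_generate_helper : List (String × String) := []

def Spec_generate_helper (configurations : List String) (_helper : Option (List (String × String))) (out : List (String × String)) : Prop := out = generate_helper_alt configurations _helper
instance (configurations : List String) (_helper : Option (List (String × String))) (out : List (String × String)) : Decidable (Spec_generate_helper configurations _helper out) := by unfold Spec_generate_helper; infer_instance

-- ===== CLAIM (what is proved, stated in full; the proofs are below) =====
def Claim_equal_generate_helper : Prop := ∀ (configurations : List String) (_helper : Option (List (String × String))), Dom_generate_helper configurations _helper → Pre_generate_helper configurations _helper → Spec_generate_helper configurations _helper (generate_helper configurations _helper)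
def Claim_raises_generate_helper : Prop := (∀ (configurations : List String) (_helper : Option (List (String × String))), Dom_generate_helper configurations _helper → Raises_generate_helper configurations _helper → ¬ Pre_generate_helper configurations _helper) ∧ (Dom_generate_helper (pvRaiseWitness_generate_helper.1) (pvRaiseWitness_generate_helper.2) ∧ Raises_generate_helper (pvRaiseWitness_generate_helper.1) (pvRaiseWitness_generate_helper.2) ∧ generate_helper_alt (pvRaiseWitness_generate_helper.1) (pvRaiseWitness_generate_helper.2) = pvRaiseWitnessOut_generate_helper)

-- ===== LEMMAS AND PROOFS =====

lemma generate_helper_eq_alt : ∀ (cs : List String) (h : Option (List (String × String))),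
    cs ≠ [] → (∀ c ∈ cs, c ∈ ["snmptrapd", "snmptrapd_users", "ovirt_notifier", "snmpd"]) →
    generate_helper cs h = generate_helper_alt cs h := by
  intro cs
  induction cs with
  | nil => intro h hne _; exact absurd rfl hne
  | cons c rest ih =>
    intro h _ hmem
    have hrest : ∀ x ∈ rest, x ∈ ["snmptrapd", "snmptrapd_users", "ovirt_notifier", "snmpd"] :=
      fun x hx => hmem x (List.mem_cons_of_mem _ hx)
    have hc := hmem c (List.mem_cons_self ..)
    -- dispatch on which of the four known names c is
    fin_cases hc
    · cases rest with
      | nil => simp [generate_helper, generate_helper_alt, pvPaths, PySem.Dict.get?]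
      | cons r rs =>
        have h1 : generate_helper ("snmptrapd" :: r :: rs) h
            = generate_helper (r :: rs)
                (some ((PySem.Dict.mk (h.getD [])).insert "snmptrapd" "/etc/snmp/snmptrapd.conf").items) := by
          simp [generate_helper]
        rw [h1, ih _ (by simp) hrest]
        simp [generate_helper_alt, pvPaths, PySem.Dict.get?]
    · cases rest with
      | nil => simp [generate_helper, generate_helper_alt, pvPaths, PySem.Dict.get?]
      | cons r rs =>
        have h1 : generate_helper ("snmptrapd_users" :: r :: rs) h
            = generate_helper (r :: rs)
                (some ((PySem.Dict.mk (h.getD [])).insert "snmptrapd_users" "/var/lib/net-snmp/snmptrapd.conf").items) := by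
          simp [generate_helper]
        rw [h1, ih _ (by simp) hrest]
        simp [generate_helper_alt, pvPaths, PySem.Dict.get?]
    · cases rest with
      | nil => simp [generate_helper, generate_helper_alt, pvPaths, PySem.Dict.get?]
      | cons r rs =>
        have h1 : generate_helper ("ovirt_notifier" :: r :: rs) h
            = generate_helper (r :: rs)
                (some ((PySem.Dict.mk (h.getD [])).insert "ovirt_notifier" "/etc/ovirt-engine/notifier/notifier.conf.d/99-snmp.conf").items) := by
          simp [generate_helper]
        rw [h1, ih _ (by simp) hrest]
        simp [generate_helper_alt, pvPaths, PySem.Dict.get?]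
    · cases rest with
      | nil => simp [generate_helper, generate_helper_alt, pvPaths, PySem.Dict.get?]
      | cons r rs =>
        have h1 : generate_helper ("snmpd" :: r :: rs) h
            = generate_helper (r :: rs)
                (some ((PySem.Dict.mk (h.getD [])).insert "snmpd" "/etc/snmp/snmpd.conf").items) := by
          simp [generate_helper]
        rw [h1, ih _ (by simp) hrest]
        simp [generate_helper_alt, pvPaths, PySem.Dict.get?]

-- ===== VERDICT (by name: the statement is the Claim_ definition above) =====
theorem generate_helper_spec : Claim_equal_generate_helper := by
  intro cs h _ hpre
  exact generate_helper_eq_alt cs h hpre.1 hpre.2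

theorem generate_helper_raises : Claim_raises_generate_helper := by
  unfold Claim_raises_generate_helper
  exact ⟨fun cs h _ hr hpre => hpre.1 hr, by decide⟩

-- self-check: the raise-witness output literal is exactly what generate_helper_raises certifies for B
lemma generate_helper_raises_ok : generate_helper_alt [] none = pvRaiseWitnessOut_generate_helper :=
  generate_helper_raises.2.2.2
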